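-- pv_equiv track=rewrite | github.com/stein212/conference-python | Admin/Map/GetAllMap.py | responseData
-- ===== SOURCE A (Python) =====
-- def responseData(data):
--     responseData = {}
--     for x,y in data.items():
--         date = x.split("#")[0]
--         if date in responseData:
--             responseData[date].append(y)
--         else:
--             responseData[date] = []
--             responseData[date].append(y)
--     return responseData
-- ===== SOURCE B (Python) =====
-- def responseData(data):
--     items = list(data.items())
--     dates = []
--     for k, _ in items:
--         d = k.split("#")[0]
--         if d not in dates:
--             dates.append(d)
--     return {d: [v for k, v in items if k.split("#")[0] == d] for d in dates}
-- ===== Notes on version B (the rewrite author's own statement) =====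
-- stated objective: alternative
-- what changed: B replaces A's single-pass running dict (append-or-create per item) with a two-phase strategy: first collect the distinct date prefixes in first-occurrence order, then build each group with a per-date filter pass over the items.
import Mathlib
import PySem

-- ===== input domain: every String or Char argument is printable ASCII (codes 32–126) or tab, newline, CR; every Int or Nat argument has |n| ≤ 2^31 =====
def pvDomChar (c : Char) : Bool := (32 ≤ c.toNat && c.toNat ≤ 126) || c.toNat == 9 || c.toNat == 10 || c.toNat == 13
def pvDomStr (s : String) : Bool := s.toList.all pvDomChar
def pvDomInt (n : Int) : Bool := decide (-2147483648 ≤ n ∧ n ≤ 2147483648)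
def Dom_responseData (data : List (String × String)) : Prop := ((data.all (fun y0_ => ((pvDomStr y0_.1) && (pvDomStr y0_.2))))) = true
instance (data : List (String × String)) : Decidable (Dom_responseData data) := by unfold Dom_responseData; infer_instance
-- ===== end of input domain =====

-- B groups by first-occurrence date list + per-date filter passes instead of A's single running-table scan (objective: alternative, same return value).

-- x.split("#")[0]; splitOn with nonempty sep never returns [], so headD "" is exact
def pvDateOf (x : String) : String := (((PySem.Str.split? x "#").getD []).headD "")

-- ===== PORT A =====
def responseData (data : List (String × String)) : List (String × List String) :=
  (data.foldl (fun d p =>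
      let date := pvDateOf p.1
      if d.contains date then
        d.modify date [] (fun l => l ++ [p.2])
      else
        (d.insert date []).modify date [] (fun l => l ++ [p.2]))
    (PySem.Dict.empty : PySem.Dict String (List String))).items

-- ===== PORT B =====
def responseData_alt (data : List (String × String)) : List (String × List String) :=
  let dates := data.foldl (fun acc p =>
      let d := pvDateOf p.1
      if d ∈ acc then acc else acc ++ [d]) ([] : List String)
  dates.map (fun d => (d, (data.filter (fun p => pvDateOf p.1 == d)).map (fun p => p.2)))

-- ===== PRECONDITION & SPEC =====
def Spec_responseData (data : List (String × String)) (out : List (String × List String)) : Prop := out = responseData_alt data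
instance (data : List (String × String)) (out : List (String × List String)) : Decidable (Spec_responseData data out) := by unfold Spec_responseData; infer_instance

-- ===== CLAIM (what is proved, stated in full; the proofs are below) =====
def Claim_equal_responseData : Prop := ∀ (data : List (String × String)), Dom_responseData data → Spec_responseData data (responseData data)

-- ===== LEMMAS AND PROOFS =====

-- A's two branches are one uniform dict update
lemma stepA_eq (d : PySem.Dict String (List String)) (p : String × String) :
    (if d.contains (pvDateOf p.1) then
        d.modify (pvDateOf p.1) [] (fun l => l ++ [p.2])
      else
        (d.insert (pvDateOf p.1) []).modify (pvDateOf p.1) [] (fun l => l ++ [p.2]))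
      = d.modify (pvDateOf p.1) [] (fun l => l ++ [p.2]) := by
  by_cases h : d.contains (pvDateOf p.1)
  · simp [h]
  · have h' : d.contains (pvDateOf p.1) = false := by simpa using h
    simp [h', PySem.Dict.modify, PySem.Dict.insert_insert_self, PySem.Dict.getD_insert_self,
      PySem.Dict.getD_of_not_contains]

lemma A_closed (data : List (String × String)) :
    responseData data =
      (PySem.Set.ofList (data.map (fun p => pvDateOf p.1))).map
        (fun k => (k, ((data.map (fun p => (pvDateOf p.1, p.2))).filter
            (fun q => q.1 == k)).map (fun q => q.2))) := by
  unfold responseData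
  have hstep : (fun (d : PySem.Dict String (List String)) (p : String × String) =>
      let date := pvDateOf p.1
      if d.contains date then d.modify date [] (fun l => l ++ [p.2])
      else (d.insert date []).modify date [] (fun l => l ++ [p.2]))
      = fun d p => d.modify (pvDateOf p.1) [] (fun l => l ++ [p.2]) := by
    funext d p; exact stepA_eq d p
  rw [hstep]
  have hmap : data.foldl (fun d p => d.modify (pvDateOf p.1) [] (fun l => l ++ [p.2]))
      (PySem.Dict.empty : PySem.Dict String (List String))
      = (data.map (fun p => (pvDateOf p.1, p.2))).foldl
          (fun d q => d.modify q.1 [] (fun l => l ++ [q.2])) PySem.Dict.empty := by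
    rw [List.foldl_map]
  rw [hmap]
  set l := data.map (fun p => (pvDateOf p.1, p.2)) with hl
  set D := l.foldl (fun d q => d.modify q.1 [] (fun l => l ++ [q.2]))
      (PySem.Dict.empty : PySem.Dict String (List String)) with hD
  have hnd : D.keys.Nodup := by
    rw [hD]
    exact PySem.Dict.nodup_keys_foldl_modify_key l Prod.fst [] (fun _ q => fun v => v ++ [q.2])
      _ (by simp)
  rw [PySem.Dict.items_eq_map_keys D hnd []]
  have hkeys : D.keys = PySem.Set.ofList (data.map (fun p => pvDateOf p.1)) := by
    rw [hD, PySem.Dict.keys_foldl_modify_key]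
    simp only [hl, List.map_map, PySem.Dict.keys_empty]
    rw [PySem.Set.update_nil_left]
    simp [Function.comp_def]
  rw [hkeys]
  apply List.map_congr_left
  intro k _
  have := PySem.Dict.getD_foldl_modify_append (l := l)
    (d := (PySem.Dict.empty : PySem.Dict String (List String))) (c := k)
  rw [hD, this]
  simp

lemma B_closed (data : List (String × String)) :
    responseData_alt data =
      (PySem.Set.ofList (data.map (fun p => pvDateOf p.1))).map
        (fun k => (k, ((data.map (fun p => (pvDateOf p.1, p.2))).filter
            (fun q => q.1 == k)).map (fun q => q.2))) := by
  unfold responseData_alt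
  have hdates : data.foldl (fun acc p =>
      let d := pvDateOf p.1
      if d ∈ acc then acc else acc ++ [d]) ([] : List String)
      = PySem.Set.ofList (data.map (fun p => pvDateOf p.1)) := by
    have hstepB : (fun (acc : List String) (p : String × String) =>
        let d := pvDateOf p.1
        if d ∈ acc then acc else acc ++ [d])
        = fun acc p => PySem.Set.add acc (pvDateOf p.1) := by
      funext acc p
      simp [PySem.Set.add_eq_ite]
    rw [hstepB, ← PySem.Set.update_map_eq_foldl_add, PySem.Set.update_nil_left]
  rw [hdates]
  apply List.map_congr_left
  intro k _
  simp [List.filter_map, List.map_map, Function.comp_def]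

-- ===== VERDICT (by name: the statement is the Claim_ definition above) =====
theorem responseData_spec : Claim_equal_responseData := by
  intro data _
  unfold Spec_responseData
  rw [A_closed, B_closed]
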